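-- pv_equiv track=rewrite | github.com/Sesostrismage/advent_2020 | year_2021/day_12/day_12.py | small_doublet_in_path
-- ===== SOURCE A (Python) =====
-- def small_doublet_in_path(path) -> bool:
--     doublet = False
--
--     for node in path:
--         is_small = node == node.lower()
--         if (path.count(node) > 1) and is_small:
--             doublet = True
--             break
--
--     return doublet
-- ===== SOURCE B (Python) =====
-- def small_doublet_in_path(path) -> bool:
--     ordered = sorted(path)
--     for a, b in zip(ordered, ordered[1:]):
--         if a == b and a == a.lower():
--             return True
--     return False
-- ===== Notes on version B (the rewrite author's own statement) =====
-- stated objective: alternative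
-- what changed: Replaces A's per-element path.count rescan with a sort-then-scan: sort the path once, then check adjacent pairs for an equal small pair (duplicates are adjacent after sorting, and the boolean only depends on counts, not order).
import Mathlib
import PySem

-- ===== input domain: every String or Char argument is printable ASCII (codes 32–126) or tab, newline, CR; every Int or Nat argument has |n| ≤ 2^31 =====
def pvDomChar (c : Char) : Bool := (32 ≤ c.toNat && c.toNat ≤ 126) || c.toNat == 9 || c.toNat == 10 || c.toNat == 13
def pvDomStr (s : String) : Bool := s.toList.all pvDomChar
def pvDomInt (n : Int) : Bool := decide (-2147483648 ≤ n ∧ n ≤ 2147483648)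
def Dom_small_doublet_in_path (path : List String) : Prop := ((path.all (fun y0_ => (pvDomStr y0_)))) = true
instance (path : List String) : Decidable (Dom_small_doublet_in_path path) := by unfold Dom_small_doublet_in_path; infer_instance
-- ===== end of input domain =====

-- B sorts the path once and scans adjacent pairs for an equal small pair, instead of A's
-- per-element path.count rescan (objective: alternative sort-then-scan algorithm).

-- ===== PORT A =====
-- the 'for node in path: … break' loop; 'full' is the whole path captured for path.count
def pvALoop (full : List String) : List String → Bool
  | [] => false
  | node :: rest =>
    let is_small := node == PySem.Str.lower node
    if (PySem.List.count full node > 1) && is_small then true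
    else pvALoop full rest

def small_doublet_in_path (path : List String) : Bool := pvALoop path path

-- ===== PORT B =====
-- 'for a, b in zip(ordered, ordered[1:]): …'
def pvBScan : List String → Bool
  | a :: b :: rest =>
    if a == b && a == PySem.Str.lower a then true
    else pvBScan (b :: rest)
  | _ => false

def small_doublet_in_path_alt (path : List String) : Bool :=
  pvBScan (PySem.List.sorted path (fun x => x) false)

-- ===== PRECONDITION & SPEC =====
def Spec_small_doublet_in_path (path : List String) (out : Bool) : Prop := out = small_doublet_in_path_alt path
instance (path : List String) (out : Bool) : Decidable (Spec_small_doublet_in_path path out) := by unfold Spec_small_doublet_in_path; infer_instance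

-- ===== CLAIM (what is proved, stated in full; the proofs are below) =====
def Claim_equal_small_doublet_in_path : Prop := ∀ (path : List String), Dom_small_doublet_in_path path → Spec_small_doublet_in_path path (small_doublet_in_path path)

-- ===== LEMMAS AND PROOFS =====

def pvSmall (n : String) : Prop := n = PySem.Str.lower n

theorem pvALoop_iff (full l : List String) :
    pvALoop full l = true ↔ ∃ n ∈ l, pvSmall n ∧ 1 < full.count n := by
  induction l with
  | nil => simp [pvALoop]
  | cons node rest ih =>
    simp only [pvALoop, PySem.List.count_eq]
    split_ifs with h
    · simp only [Bool.and_eq_true, decide_eq_true_eq, beq_iff_eq] at h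
      simp only [true_iff]
      exact ⟨node, by simp, h.2, h.1⟩
    · simp only [Bool.and_eq_true, decide_eq_true_eq, beq_iff_eq, not_and_or] at h
      rw [ih]
      constructor
      · rintro ⟨n, hn, hs, hc⟩; exact ⟨n, by simp [hn], hs, hc⟩
      · rintro ⟨n, hn, hs, hc⟩
        rcases List.mem_cons.mp hn with rfl | hn
        · rcases h with h | h
          · omega
          · exact absurd hs h
        · exact ⟨n, hn, hs, hc⟩

theorem exists_of_pvBScan (l : List String) (h : pvBScan l = true) :
    ∃ n, pvSmall n ∧ 2 ≤ l.count n := by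
  induction l with
  | nil => simp [pvBScan] at h
  | cons a rest ih =>
    cases rest with
    | nil => simp [pvBScan] at h
    | cons b rest' =>
      rw [pvBScan] at h
      split_ifs at h with hc
      · simp only [Bool.and_eq_true, beq_iff_eq] at hc
        refine ⟨a, hc.2, ?_⟩
        rw [List.count_cons_self, hc.1, List.count_cons_self]
        omega
      · rcases ih h with ⟨n, hs, hcnt⟩
        refine ⟨n, hs, ?_⟩
        rcases eq_or_ne n a with rfl | hne
        · rw [List.count_cons_self]; omega
        · rw [List.count_cons_of_ne hne.symm]; exact hcnt

theorem pvBScan_of_count (l : List String) (hp : l.Pairwise (· ≤ ·))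
    (n : String) (hs : pvSmall n) (hc : 2 ≤ l.count n) : pvBScan l = true := by
  induction l with
  | nil => simp at hc
  | cons a rest ih =>
    cases rest with
    | nil =>
      rcases eq_or_ne n a with rfl | hne
      · simp at hc
      · rw [List.count_cons_of_ne hne.symm] at hc; simp at hc
    | cons b rest' =>
      have hp' : (b :: rest').Pairwise (· ≤ ·) := hp.tail
      rw [pvBScan]
      split_ifs with hcond
      · rfl
      · apply ih hp'
        rcases eq_or_ne n a with rfl | hne
        · -- n = a: show b = a so the condition would have fired — contradiction,
          -- unless n also occurs twice in the tail; derive b = a directly.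
          exfalso
          have hmem : n ∈ b :: rest' := by
            rw [List.count_cons_self] at hc
            exact List.count_pos_iff.mp (by omega)
          have hab : n ≤ b := (List.pairwise_cons.mp hp).1 b (by simp)
          have hbn : b ≤ n := by
            rcases List.mem_cons.mp hmem with rfl | hmem'
            · exact le_refl _
            · exact (List.pairwise_cons.mp hp').1 n hmem'
          have hba : b = n := le_antisymm hbn hab
          apply hcond
          simp only [Bool.and_eq_true, beq_iff_eq]
          exact ⟨hba.symm, hs⟩
        · rw [List.count_cons_of_ne hne.symm] at hc
          exact hc

theorem both_iff (path : List String) :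
    small_doublet_in_path path = small_doublet_in_path_alt path := by
  have hperm : (PySem.List.sorted path (fun x => x) false).Perm path :=
    PySem.List.sorted_perm path (fun x => x) false
  have hpair : (PySem.List.sorted path (fun x => x) false).Pairwise (· ≤ ·) := by
    have := PySem.List.sorted_pairwise path (fun x => x)
    simpa using this
  show pvALoop path path = pvBScan (PySem.List.sorted path (fun x => x) false)
  cases hB : pvBScan (PySem.List.sorted path (fun x => x) false) with
  | true =>
    rcases exists_of_pvBScan _ hB with ⟨n, hs, hc⟩
    rw [hperm.count_eq] at hc
    have hmem : n ∈ path := List.count_pos_iff.mp (by omega)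
    exact (pvALoop_iff path path).mpr ⟨n, hmem, hs, by omega⟩
  | false =>
    by_contra hne
    have hA : pvALoop path path = true := by
      revert hne; cases pvALoop path path <;> simp
    rcases (pvALoop_iff path path).mp hA with ⟨n, _, hs, hc⟩
    have : pvBScan (PySem.List.sorted path (fun x => x) false) = true :=
      pvBScan_of_count _ hpair n hs (by rw [hperm.count_eq]; omega)
    rw [this] at hB
    exact Bool.noConfusion hB

-- ===== VERDICT (by name: the statement is the Claim_ definition above) =====
theorem small_doublet_in_path_spec : Claim_equal_small_doublet_in_path := by
  intro path _
  exact both_iff path
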